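-- pv_equiv track=rewrite | github.com/saurabnigam/dbt-coverage | src/dbt_coverage/parsers/line_map.py | _ends_inside_jinja_block
-- ===== SOURCE A (Python) =====
-- def _ends_inside_jinja_block(line: str, starts_inside: bool) -> bool:
--     """Return True if the position after this line is still inside an open {{ or {% block.
--
--     Performs a simple character-scan: tracks open/close tokens for both
--     print-blocks (``{{ }}``) and tag-blocks (``{% %}``) as well as Jinja
--     comment blocks (``{# #}``).  String literals inside blocks are NOT
--     modelled; this is intentional (false negatives are safe — we simply skip
--     a marker injection, which is conservative and correct).
--     """
--     depth = 1 if starts_inside else 0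
--     i = 0
--     n = len(line)
--     while i < n:
--         ch = line[i]
--         if ch == "{" and i + 1 < n and line[i + 1] in ("{", "%", "#"):
--             depth += 1
--             i += 2
--         elif ch == "}" and i + 1 < n and line[i + 1] == "}" or ch == "%" and i + 1 < n and line[i + 1] == "}" or ch == "#" and i + 1 < n and line[i + 1] == "}":
--             depth = max(0, depth - 1)
--             i += 2
--         else:
--             i += 1
--     return depth > 0
-- ===== SOURCE B (Python) =====
-- def _ends_inside_jinja_block(line: str, starts_inside: bool) -> bool:
--     # Pass 1: extract, in order, the open (+1) / close (-1) Jinja marker tokens.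
--     tokens = []
--     i, n = 0, len(line)
--     while i < n - 1:
--         a, b = line[i], line[i + 1]
--         if a == "{" and b in "{%#":
--             tokens.append(1)
--             i += 2
--         elif b == "}" and a in "}%#":
--             tokens.append(-1)
--             i += 2
--         else:
--             i += 1
--     # Pass 2: the clamped depth fold ends positive iff some suffix of the token
--     # list has positive sum, or the start depth plus the total sum is positive.
--     total = best = 0
--     for v in reversed(tokens):
--         total += v
--         if total > best:
--             best = total
--     return best > 0 or (1 if starts_inside else 0) + total > 0
-- ===== Notes on version B (the rewrite author's own statement) =====
-- stated objective: alternative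
-- what changed: B first extracts the ordered list of +1/-1 marker tokens, then replaces A's sequential clamped-depth update by a closed-form test on the token list's maximum suffix sum and total sum.
import Mathlib
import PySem

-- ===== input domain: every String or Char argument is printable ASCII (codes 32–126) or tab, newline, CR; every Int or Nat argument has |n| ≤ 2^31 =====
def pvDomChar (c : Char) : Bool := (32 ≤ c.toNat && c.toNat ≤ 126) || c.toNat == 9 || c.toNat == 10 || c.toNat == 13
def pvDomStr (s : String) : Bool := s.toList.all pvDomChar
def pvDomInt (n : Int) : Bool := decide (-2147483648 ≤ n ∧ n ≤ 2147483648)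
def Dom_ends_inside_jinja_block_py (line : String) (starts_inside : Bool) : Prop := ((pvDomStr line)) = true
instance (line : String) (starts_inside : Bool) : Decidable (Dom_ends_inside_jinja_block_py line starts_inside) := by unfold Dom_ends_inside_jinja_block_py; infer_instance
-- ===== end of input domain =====

-- B: two-pass alternative — tokenise the open/close markers, then decide via the
-- token list's max suffix sum instead of A's sequential clamped depth; same cost.
-- ===== PORT A =====
-- A's while-loop over indices as structural recursion on the remaining characters,
-- with the two-character lookahead and the same branch order.
def pvALoop : List Char → Int → Int
  | [], d => d
  | [_], d => d
  | c1 :: c2 :: rest, d =>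
    if c1 = '{' ∧ (c2 = '{' ∨ c2 = '%' ∨ c2 = '#') then
      pvALoop rest (d + 1)
    else if (c1 = '}' ∧ c2 = '}') ∨ (c1 = '%' ∧ c2 = '}') ∨ (c1 = '#' ∧ c2 = '}') then
      pvALoop rest (max 0 (d - 1))
    else
      pvALoop (c2 :: rest) d

def ends_inside_jinja_block_py (line : String) (starts_inside : Bool) : Bool :=
  decide (0 < pvALoop line.toList (if starts_inside then 1 else 0))

-- ===== PORT B =====
-- B pass 1: the ordered list of +1 (open) / -1 (close) marker tokens.
def pvTokens : List Char → List Int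
  | [] => []
  | [_] => []
  | c1 :: c2 :: rest =>
    if c1 = '{' ∧ (c2 = '{' ∨ c2 = '%' ∨ c2 = '#') then
      1 :: pvTokens rest
    else if c2 = '}' ∧ (c1 = '}' ∨ c1 = '%' ∨ c1 = '#') then
      (-1) :: pvTokens rest
    else
      pvTokens (c2 :: rest)

-- B pass 2 (the reversed loop): (total sum, best suffix sum so far, floored at 0).
def pvSuffix : List Int → Int × Int
  | [] => (0, 0)
  | v :: ts =>
    let p := pvSuffix ts
    (p.1 + v, max p.2 (p.1 + v))

def ends_inside_jinja_block_py_alt (line : String) (starts_inside : Bool) : Bool :=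
  let p := pvSuffix (pvTokens line.toList)
  decide (0 < p.2 ∨ 0 < (if starts_inside then (1 : Int) else 0) + p.1)

-- ===== PRECONDITION & SPEC =====
def Spec_ends_inside_jinja_block_py (line : String) (starts_inside : Bool) (out : Bool) : Prop := out = ends_inside_jinja_block_py_alt line starts_inside
instance (line : String) (starts_inside : Bool) (out : Bool) : Decidable (Spec_ends_inside_jinja_block_py line starts_inside out) := by unfold Spec_ends_inside_jinja_block_py; infer_instance

-- ===== CLAIM (what is proved, stated in full; the proofs are below) =====
def Claim_equal_ends_inside_jinja_block_py : Prop := ∀ (line : String) (starts_inside : Bool), Dom_ends_inside_jinja_block_py line starts_inside → Spec_ends_inside_jinja_block_py line starts_inside (ends_inside_jinja_block_py line starts_inside)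

-- ===== LEMMAS AND PROOFS =====

-- best ≥ total and best ≥ 0
lemma pvSuffix_ge (ts : List Int) : (pvSuffix ts).1 ≤ (pvSuffix ts).2 ∧ 0 ≤ (pvSuffix ts).2 := by
  induction ts with
  | nil => simp [pvSuffix]
  | cons v ts ih => simp only [pvSuffix]; omega

-- A's clamped fold in closed form over B's token summary.
lemma pvALoop_eq (cs : List Char) : ∀ d : Int, 0 ≤ d →
    pvALoop cs d = max (pvSuffix (pvTokens cs)).2 ((pvSuffix (pvTokens cs)).1 + d) := by
  induction cs using pvTokens.induct with
  | case1 => intro d hd; simp [pvALoop, pvTokens, pvSuffix]; omega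
  | case2 c => intro d hd; simp [pvALoop, pvTokens, pvSuffix]; omega
  | case3 c1 c2 rest h ih =>
    intro d hd
    have hs := pvSuffix_ge (pvTokens rest)
    rw [pvALoop, pvTokens, if_pos h, if_pos h, ih (d + 1) (by omega)]
    simp only [pvSuffix]; omega
  | case4 c1 c2 rest h1 h2 ih =>
    intro d hd
    have hs := pvSuffix_ge (pvTokens rest)
    have h2' : (c1 = '}' ∧ c2 = '}') ∨ (c1 = '%' ∧ c2 = '}') ∨ (c1 = '#' ∧ c2 = '}') := by
      tauto
    rw [pvALoop, pvTokens, if_neg h1, if_neg h1, if_pos h2, if_pos h2',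
      ih (max 0 (d - 1)) (by omega)]
    simp only [pvSuffix]; omega
  | case5 c1 c2 rest h1 h2 ih =>
    intro d hd
    have h2' : ¬ ((c1 = '}' ∧ c2 = '}') ∨ (c1 = '%' ∧ c2 = '}') ∨ (c1 = '#' ∧ c2 = '}')) := by
      tauto
    rw [pvALoop, pvTokens, if_neg h1, if_neg h1, if_neg h2, if_neg h2', ih d hd]

-- ===== VERDICT (by name: the statement is the Claim_ definition above) =====
theorem ends_inside_jinja_block_py_spec : Claim_equal_ends_inside_jinja_block_py := by
  intro line starts_inside _
  unfold Spec_ends_inside_jinja_block_py ends_inside_jinja_block_py ends_inside_jinja_block_py_alt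
  rw [pvALoop_eq line.toList _ (by split <;> omega)]
  simp only [decide_eq_decide]
  omega
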